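-- pv_equiv track=rewrite | github.com/RupinderKaur10/Data-Stuctures-and-Algorithms | searching and sorting/permuting two arrays.py | permuting
-- ===== SOURCE A (Python) =====
-- class data(object):
--     def __init__(self,A,B):
--         self.A = A
--         self.B = B
--
-- def permuting(a, b, k):
--     pack = []
--     for i in range(len(a)):
--         for j in range(len(b)):
--             if a[i] + b[j] >= k:
--                 pack.append(data(a[i],b[j]))
--     if len(pack) >= len(a):
--         return "YES"
--     else:
--         return "NO"
-- ===== SOURCE B (Python) =====
-- def permuting(a, b, k):
--     # Sort b once; for each x in a, count elements of b that are >= k - x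
--     # with a hand-written bisect_left (binary search); compare the total
--     # pair count with len(a).
--     sb = sorted(b)
--     m = len(sb)
--     total = 0
--     for x in a:
--         t = k - x
--         lo, hi = 0, m
--         while lo < hi:
--             mid = (lo + hi) // 2
--             if sb[mid] < t:
--                 lo = mid + 1
--             else:
--                 hi = mid
--         total += m - lo
--     if total >= len(a):
--         return "YES"
--     else:
--         return "NO"
-- ===== Notes on version B (the rewrite author's own statement) =====
-- stated objective: faster
-- what changed: Replaced the nested scan that materialises one object per qualifying pair with a sort of b plus a binary-search count of b[j] >= k - x for each x in a, summing counts instead of building a list.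
import Mathlib
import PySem

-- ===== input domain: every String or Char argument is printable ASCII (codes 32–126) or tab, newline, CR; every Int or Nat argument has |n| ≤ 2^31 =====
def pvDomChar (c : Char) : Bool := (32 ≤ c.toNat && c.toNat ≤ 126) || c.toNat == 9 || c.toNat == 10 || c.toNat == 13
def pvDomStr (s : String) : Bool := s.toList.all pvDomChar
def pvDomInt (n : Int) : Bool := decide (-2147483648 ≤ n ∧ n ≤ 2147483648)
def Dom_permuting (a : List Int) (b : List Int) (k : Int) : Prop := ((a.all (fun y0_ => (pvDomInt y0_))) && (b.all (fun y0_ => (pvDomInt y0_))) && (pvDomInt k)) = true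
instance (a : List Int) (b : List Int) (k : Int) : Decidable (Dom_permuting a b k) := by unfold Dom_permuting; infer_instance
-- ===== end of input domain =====

-- B sorts b once and binary-searches the count of b[j] >= k - x for each x in a (faster: no per-pair object list).

-- ===== PORT A =====
-- Python's data(A, B) objects carry exactly the pair (A, B); only the length of pack is used.
def permuting (a : List Int) (b : List Int) (k : Int) : String :=
  if ((PySem.List.pyRange 0 (PySem.List.len a)).foldl (fun pack i =>
      (PySem.List.pyRange 0 (PySem.List.len b)).foldl (fun pack j =>
        if PySem.List.pyGetD a i 0 + PySem.List.pyGetD b j 0 ≥ k then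
          pack ++ [(PySem.List.pyGetD a i 0, PySem.List.pyGetD b j 0)]
        else pack) pack) ([] : List (Int × Int))).length ≥ a.length
  then "YES" else "NO"

-- ===== PORT B =====
-- Source B's hand-written lo/hi/mid loop is verbatim CPython's bisect_left, which is PySem.List.bisectLeft (same loop).
def permuting_alt (a : List Int) (b : List Int) (k : Int) : String :=
  if a.foldl (fun total x =>
      total + (PySem.List.len (PySem.List.sorted b (fun y => y) false)
        - (PySem.List.bisectLeft (PySem.List.sorted b (fun y => y) false) (k - x) : Int))) 0
     ≥ PySem.List.len a
  then "YES" else "NO"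

-- ===== PRECONDITION & SPEC =====
def Spec_permuting (a : List Int) (b : List Int) (k : Int) (out : String) : Prop := out = permuting_alt a b k
instance (a : List Int) (b : List Int) (k : Int) (out : String) : Decidable (Spec_permuting a b k out) := by unfold Spec_permuting; infer_instance

-- ===== CLAIM (what is proved, stated in full; the proofs are below) =====
def Claim_equal_permuting : Prop := ∀ (a : List Int) (b : List Int) (k : Int), Dom_permuting a b k → Spec_permuting a b k (permuting a b k)

-- ===== LEMMAS AND PROOFS =====

-- On a ≤-sorted list, (length − bisectLeft t) counts the elements ≥ t.
lemma count_ge_of_sorted (sb : List Int) (t : Int)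
    (hs : List.Pairwise (fun x y => x ≤ y) sb) :
    sb.countP (fun y => decide (t ≤ y)) = sb.length - PySem.List.bisectLeft sb t := by
  obtain ⟨hle, hlt, hge⟩ := PySem.List.bisectLeft_spec sb t hs
  set r := PySem.List.bisectLeft sb t with hr
  have hsplit : sb = sb.take r ++ sb.drop r := (List.take_append_drop r sb).symm
  rw [hsplit, List.countP_append]
  have h1 : (sb.take r).countP (fun y => decide (t ≤ y)) = 0 := by
    rw [List.countP_eq_zero]
    intro y hy
    obtain ⟨j, hj, rfl⟩ := List.mem_iff_getElem.mp hy
    have hjr : j < r := lt_of_lt_of_le hj (by simp)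
    have hjl : j < sb.length := lt_of_lt_of_le hjr hle
    have := hlt j hjl hjr
    simp only [List.getElem_take] at *
    simp; omega
  have h2 : (sb.drop r).countP (fun y => decide (t ≤ y)) = (sb.drop r).length := by
    rw [List.countP_eq_length]
    intro y hy
    obtain ⟨j, hj, rfl⟩ := List.mem_iff_getElem.mp hy
    rw [List.getElem_drop]
    have hjl : r + j < sb.length := by
      have := hj; simp only [List.length_drop] at this; omega
    have := hge (r + j) hjl (Nat.le_add_right r j)
    simpa using this
  simp only [h1, h2, List.length_drop, List.length_append, List.length_take]
  omega

-- Per-element count: B's binary-search term equals the number of y ∈ b with x + y ≥ k.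
lemma per_elem (b : List Int) (k x : Int) :
    ((PySem.List.sorted b (fun y => y) false).length : Int)
      - (PySem.List.bisectLeft (PySem.List.sorted b (fun y => y) false) (k - x) : Int)
    = ((b.filter (fun y => decide (x + y ≥ k))).length : Int) := by
  set sb := PySem.List.sorted b (fun y => y) false with hsb
  have hs : List.Pairwise (fun p q => p ≤ q) sb := PySem.List.sorted_pairwise b (fun y => y)
  have hperm : sb.Perm b := PySem.List.sorted_perm b (fun y => y) false
  have hcnt := count_ge_of_sorted sb (k - x) hs
  have hle := (PySem.List.bisectLeft_spec sb (k - x) hs).1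
  have hb : b.countP (fun y => decide (x + y ≥ k)) = sb.countP (fun y => decide (k - x ≤ y)) := by
    rw [hperm.countP_eq]
    apply List.countP_congr
    intro y _
    constructor <;> (intro h; simp_all; omega)
  rw [← List.countP_eq_length_filter, hb, hcnt]
  omega

theorem permuting_spec : Claim_equal_permuting := by
  intro a b k _
  unfold Spec_permuting permuting permuting_alt
  have hinner : ∀ (pack : List (Int × Int)) (x : Int),
      (PySem.List.pyRange 0 (PySem.List.len b)).foldl (fun pack j =>
        if x + PySem.List.pyGetD b j 0 ≥ k then pack ++ [(x, PySem.List.pyGetD b j 0)] else pack) pack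
      = pack ++ (b.filter (fun y => decide (x + y ≥ k))).map (fun y => (x, y)) := by
    intro pack x
    rw [PySem.List.foldl_pyRange_pyGetD (a := 0) b 0
      (fun pack y => if x + y ≥ k then pack ++ [(x, y)] else pack) pack le_rfl]
    simp only [Int.toNat_zero, List.drop_zero]
    exact PySem.List.foldl_append_ite (fun y => x + y ≥ k) (fun y => (x, y)) b pack
  -- A's pair list, flattened: its length is the total pair count
  have hA : ((PySem.List.pyRange 0 (PySem.List.len a)).foldl (fun pack i =>
      (PySem.List.pyRange 0 (PySem.List.len b)).foldl (fun pack j =>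
        if PySem.List.pyGetD a i 0 + PySem.List.pyGetD b j 0 ≥ k then
          pack ++ [(PySem.List.pyGetD a i 0, PySem.List.pyGetD b j 0)]
        else pack) pack) ([] : List (Int × Int))).length
      = (a.map (fun x => (b.filter (fun y => decide (x + y ≥ k))).length)).sum := by
    rw [PySem.List.foldl_pyRange_pyGetD (a := 0) a 0
      (fun pack x => List.foldl (fun pack j =>
        if x + PySem.List.pyGetD b j 0 ≥ k then pack ++ [(x, PySem.List.pyGetD b j 0)]
        else pack) pack (PySem.List.pyRange 0 (PySem.List.len b))) ([] : List (Int × Int)) le_rfl]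
    simp only [Int.toNat_zero, List.drop_zero]
    rw [PySem.List.foldl_congr_mem a
      (fun pack x => List.foldl (fun pack j =>
        if x + PySem.List.pyGetD b j 0 ≥ k then pack ++ [(x, PySem.List.pyGetD b j 0)]
        else pack) pack (PySem.List.pyRange 0 (PySem.List.len b)))
      (fun pack x => pack ++ (b.filter (fun y => decide (x + y ≥ k))).map (fun y => (x, y)))
      ([] : List (Int × Int))
      (by intro acc x _; exact hinner acc x)]
    rw [PySem.List.foldl_append_eq_flatMap]
    simp [List.length_flatMap]
  -- B's total: a sum of the per-element counts
  have hB : a.foldl (fun total x =>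
      total + (PySem.List.len (PySem.List.sorted b (fun y => y) false)
        - (PySem.List.bisectLeft (PySem.List.sorted b (fun y => y) false) (k - x) : Int))) 0
      = ((a.map (fun x => (b.filter (fun y => decide (x + y ≥ k))).length)).sum : Int) := by
    rw [PySem.List.foldl_add]
    have hmap : a.map (fun x =>
        PySem.List.len (PySem.List.sorted b (fun y => y) false)
          - (PySem.List.bisectLeft (PySem.List.sorted b (fun y => y) false) (k - x) : Int))
        = a.map (fun x => ((b.filter (fun y => decide (x + y ≥ k))).length : Int)) := by
      apply List.map_congr_left; intro x _
      simpa [PySem.List.len] using per_elem b k x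
    rw [hmap, Nat.cast_list_sum, List.map_map, zero_add]
    rfl
  rw [hA, hB]
  refine if_congr ?_ rfl rfl
  simp only [ge_iff_le, PySem.List.len]
  exact ⟨fun h => by exact_mod_cast h, fun h => by exact_mod_cast h⟩
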